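-- pv_equiv track=rewrite | github.com/eason034056/nba-player-stats-analysis | backend/app/services/normalize.py | _collapse_initial_tokens
-- ===== SOURCE A (Python) =====
-- from typing import Dict, Iterable, List, Optional, Sequence, Set, Tuple
--
-- def _collapse_initial_tokens(tokens: Sequence[str]) -> List[str]:
--     """
--     Merge consecutive single-letter tokens.
--
--     For example:
--     - ["p", "j", "washington"] -> ["pj", "washington"]
--     - ["s", "curry"] -> ["s", "curry"]
--     """
--     collapsed: List[str] = []
--     idx = 0
--     while idx < len(tokens):
--         if len(tokens[idx]) != 1:
--             collapsed.append(tokens[idx])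
--             idx += 1
--             continue
--
--         end = idx
--         initials: List[str] = []
--         while end < len(tokens) and len(tokens[end]) == 1:
--             initials.append(tokens[end])
--             end += 1
--
--         collapsed.append("".join(initials))
--         idx = end
--
--     return collapsed
-- ===== SOURCE B (Python) =====
-- from typing import List, Sequence
--
--
-- def _collapse_initial_tokens(tokens: Sequence[str]) -> List[str]:
--     """Merge consecutive single-letter tokens (one pass with a pending-run buffer)."""
--     out: List[str] = []
--     run: List[str] = []
--     for t in tokens:
--         if len(t) == 1:
--             run.append(t)
--         else:
--             if run:
--                 out.append("".join(run))
--                 run = []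
--             out.append(t)
--     if run:
--         out.append("".join(run))
--     return out
-- ===== Notes on version B (the rewrite author's own statement) =====
-- stated objective: simpler
-- what changed: Replaced the index-based outer while with a nested inner while (re-scanning each run via idx/end bookkeeping) by a single forward pass that accumulates the current run of single-letter tokens in a buffer and flushes it when a longer token or the end of input is reached.
import Mathlib
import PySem

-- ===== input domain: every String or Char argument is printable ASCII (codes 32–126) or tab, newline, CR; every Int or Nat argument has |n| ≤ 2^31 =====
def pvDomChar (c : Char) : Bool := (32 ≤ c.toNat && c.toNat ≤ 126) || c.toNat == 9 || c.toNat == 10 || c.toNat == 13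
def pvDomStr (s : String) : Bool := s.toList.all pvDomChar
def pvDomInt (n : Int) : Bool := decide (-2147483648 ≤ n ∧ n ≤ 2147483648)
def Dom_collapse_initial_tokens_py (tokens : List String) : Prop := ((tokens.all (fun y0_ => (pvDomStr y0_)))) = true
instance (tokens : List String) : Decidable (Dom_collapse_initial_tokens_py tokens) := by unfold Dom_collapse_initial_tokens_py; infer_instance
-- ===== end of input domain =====

-- B replaces A's idx/end inner-while bookkeeping by a single pass with a pending-run buffer (objective: simpler; same cost).

-- ===== PORT A =====
-- inner 'while end < len(tokens) and len(tokens[end]) == 1' loop: returns (initials, remaining suffix)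
def pvGatherA (ts : List String) : List String × List String :=
  match ts with
  | [] => ([], [])
  | t :: rest =>
    if PySem.Str.len t = 1 then
      let g := pvGatherA rest
      (t :: g.1, g.2)
    else ([], t :: rest)

theorem pvGatherA_len (ts : List String) : (pvGatherA ts).2.length ≤ ts.length := by
  induction ts with
  | nil => simp [pvGatherA]
  | cons t rest ih =>
    simp only [pvGatherA]
    split
    · exact Nat.le_succ_of_le ih
    · simp

-- outer 'while idx < len(tokens)' loop of A
def collapse_initial_tokens_py (tokens : List String) : List String :=
  match tokens with
  | [] => []
  | t :: rest =>
    if _h : PySem.Str.len t ≠ 1 then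
      t :: collapse_initial_tokens_py rest
    else
      PySem.Str.join "" (pvGatherA (t :: rest)).1 :: collapse_initial_tokens_py (pvGatherA (t :: rest)).2
termination_by tokens.length
decreasing_by
  · simp
  · simp only [pvGatherA, if_pos (by omega : PySem.Str.len t = 1)]
    exact Nat.lt_succ_of_le (pvGatherA_len rest)

-- ===== PORT B =====
-- B's for-loop over tokens, state (out, run); flushes the pending run at the end
def pvLoopB (ts : List String) (out : List String) (run : List String) : List String :=
  match ts with
  | [] => if run ≠ [] then out ++ [PySem.Str.join "" run] else out
  | t :: rest =>
    if PySem.Str.len t = 1 then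
      pvLoopB rest out (run ++ [t])
    else if run ≠ [] then
      pvLoopB rest (out ++ [PySem.Str.join "" run, t]) []
    else
      pvLoopB rest (out ++ [t]) run

def collapse_initial_tokens_py_alt (tokens : List String) : List String :=
  pvLoopB tokens [] []

-- ===== PRECONDITION & SPEC =====
def Spec_collapse_initial_tokens_py (tokens : List String) (out : List String) : Prop := out = collapse_initial_tokens_py_alt tokens
instance (tokens : List String) (out : List String) : Decidable (Spec_collapse_initial_tokens_py tokens out) := by unfold Spec_collapse_initial_tokens_py; infer_instance

-- ===== CLAIM (what is proved, stated in full; the proofs are below) =====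
def Claim_equal_collapse_initial_tokens_py : Prop := ∀ (tokens : List String), Dom_collapse_initial_tokens_py tokens → Spec_collapse_initial_tokens_py tokens (collapse_initial_tokens_py tokens)

-- ===== LEMMAS AND PROOFS =====

-- pvLoopB only ever appends to 'out'
theorem pvLoopB_out (ts : List String) : ∀ out run, pvLoopB ts out run = out ++ pvLoopB ts [] run := by
  induction ts with
  | nil => intro out run; by_cases h : run = [] <;> simp [pvLoopB, h]
  | cons t rest ih =>
    intro out run
    by_cases h1 : t.length = 1
    · simp [pvLoopB, h1]
      exact ih out (run ++ [t])
    · by_cases h2 : run = []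
      · simp [pvLoopB, h1, h2]
        rw [ih (out ++ [t]) [], ih [t] []]
        simp
      · simp [pvLoopB, h1, h2]
        rw [ih (out ++ [PySem.Str.join "" run, t]) [], ih [PySem.Str.join "" run, t] []]
        simp

-- with a nonempty pending run, pvLoopB first finishes the run exactly as pvGatherA gathers it
theorem pvLoopB_run (ts : List String) : ∀ run, run ≠ [] →
    pvLoopB ts [] run =
      PySem.Str.join "" (run ++ (pvGatherA ts).1) :: pvLoopB (pvGatherA ts).2 [] [] := by
  induction ts with
  | nil => intro run h; simp [pvLoopB, pvGatherA, h]
  | cons t rest ih =>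
    intro run h
    by_cases h1 : t.length = 1
    · simp [pvLoopB, pvGatherA, h1]
      rw [ih (run ++ [t]) (by simp)]
      simp
    · simp [pvLoopB, pvGatherA, h1, h]
      rw [pvLoopB_out rest [PySem.Str.join "" run, t] [], pvLoopB_out rest [t] []]
      simp

theorem pvMain : ∀ n ts, ts.length ≤ n → collapse_initial_tokens_py ts = pvLoopB ts [] [] := by
  intro n
  induction n with
  | zero =>
    intro ts h
    have hts : ts = [] := List.eq_nil_of_length_eq_zero (Nat.le_zero.mp h)
    subst hts
    rw [collapse_initial_tokens_py]
    simp [pvLoopB]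
  | succ n ih =>
    intro ts h
    match ts with
    | [] =>
      rw [collapse_initial_tokens_py]
      simp [pvLoopB]
    | t :: rest =>
      rw [collapse_initial_tokens_py]
      by_cases h1 : t.length = 1
      · simp [pvLoopB, pvGatherA, h1]
        rw [pvLoopB_run rest [t] (by simp)]
        simp [pvGatherA, h1]
        exact ih _ (le_trans (pvGatherA_len rest) (by simpa using Nat.lt_succ_iff.mp (by simpa using h)))
      · simp [pvLoopB, h1]
        rw [pvLoopB_out rest [t] []]
        simp only [List.singleton_append, List.cons.injEq, true_and]
        exact ih rest (by simpa using Nat.lt_succ_iff.mp (by simpa using h))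

-- ===== VERDICT (by name: the statement is the Claim_ definition above) =====
theorem collapse_initial_tokens_py_spec : Claim_equal_collapse_initial_tokens_py := by
  intro tokens _
  unfold Spec_collapse_initial_tokens_py collapse_initial_tokens_py_alt
  exact pvMain tokens.length tokens (le_refl _)
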